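-- pv_equiv track=rewrite | github.com/4kamru/dzadania | module_9_6.py | all_variants_v2
-- ===== SOURCE A (Python) =====
-- def all_variants_v2(text):
--     i = 0
--     k = 0
--     res = ''
--     stroka = list(text)
--     while i != len(text):
--         res = stroka[i]
--         stroka = list(text.lstrip())
--         while k < i:
--             res += stroka[k]
--             yield res[::-1]
--             k += 1
--         i += 1
-- ===== SOURCE B (Python) =====
-- def all_variants_v2(text):
--     for a, b in zip(text, text[1:]):
--         yield a + b
-- ===== Notes on version B (the rewrite author's own statement) =====
-- stated objective: faster
-- what changed: A single pass zipping the string with itself shifted by one yields the adjacent bigrams directly, replacing A's two nested while-loops with a never-resetting counter k, a per-iteration rebuild of list(text.lstrip()), and a reversed two-character accumulator.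
import Mathlib
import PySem

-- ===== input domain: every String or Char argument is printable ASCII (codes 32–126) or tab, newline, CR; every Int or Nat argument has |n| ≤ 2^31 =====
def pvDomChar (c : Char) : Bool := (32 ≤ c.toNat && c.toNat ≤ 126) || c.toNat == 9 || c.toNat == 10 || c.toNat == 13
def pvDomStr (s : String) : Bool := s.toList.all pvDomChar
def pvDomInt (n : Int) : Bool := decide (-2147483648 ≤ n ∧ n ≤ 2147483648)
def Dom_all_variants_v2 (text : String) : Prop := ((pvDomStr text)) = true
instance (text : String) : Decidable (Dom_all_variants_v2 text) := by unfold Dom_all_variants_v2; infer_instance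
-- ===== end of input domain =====

-- B replaces A's nested while-loops (never-resetting counter k, per-iteration lstrip rebuild,
-- reversed accumulator) by one zip over adjacent character pairs; equivalence is about the list
-- of yielded values of the generators.

-- ===== PORT A =====
-- inner 'while k < i' loop: returns (acc, res, k) after the loop; a none lookup is
-- Python's IndexError (only reachable outside Pre_), the port stops there.
def pvA_inner (stroka res : List Char) (k i : Nat) (acc : List String) :
    List String × List Char × Nat :=
  if k < i then
    match stroka[k]? with
    | none => (acc, res, k)
    | some c => pvA_inner stroka (res ++ [c]) (k + 1) i (acc ++ [String.mk (res ++ [c]).reverse])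
  else (acc, res, k)
termination_by i - k

-- outer 'while i != len(text)' loop; fuel = len(text) - i counts the remaining iterations.
def pvA_outer (stripped : List Char) (fuel i k : Nat) (stroka : List Char)
    (acc : List String) : List String :=
  match fuel with
  | 0 => acc
  | fuel' + 1 =>
    match stroka[i]? with
    | none => acc   -- IndexError 'res = stroka[i]' (only outside Pre_)
    | some c =>
      let st := pvA_inner stripped [c] k i acc
      pvA_outer stripped fuel' (i + 1) st.2.2 stripped st.1

def all_variants_v2 (text : String) : List String :=
  pvA_outer ((PySem.Str.lstrip text).toList) text.toList.length 0 0 text.toList []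

-- ===== PORT B =====
def all_variants_v2_alt (text : String) : List String :=
  (text.toList.zip (text.toList.drop 1)).map (fun p => String.mk [p.1, p.2])

-- ===== PRECONDITION & SPEC =====
-- Pre_ excludes exactly the inputs on which A raises IndexError: length ≥ 2 with a
-- whitespace first character (then list(text.lstrip()) is shorter than text).
def Pre_all_variants_v2 (text : String) : Prop :=
  2 ≤ text.toList.length → PySem.Chars.isspace text.toList.headI = false
instance (text : String) : Decidable (Pre_all_variants_v2 text) := by
  unfold Pre_all_variants_v2; infer_instance

def pvWitness_all_variants_v2 : String := "ab"

def Spec_all_variants_v2 (text : String) (out : List String) : Prop :=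
  out = all_variants_v2_alt text
instance (text : String) (out : List String) : Decidable (Spec_all_variants_v2 text out) := by
  unfold Spec_all_variants_v2; infer_instance

-- ===== CLAIM (what is proved, stated in full; the proofs are below) =====
def Claim_equal_all_variants_v2 : Prop :=
  ∀ (text : String), Dom_all_variants_v2 text → Pre_all_variants_v2 text →
    Spec_all_variants_v2 text (all_variants_v2 text)

-- ===== LEMMAS AND PROOFS =====

-- one pass of the inner loop with k = i - 1 < i (the only live case under Pre_)
lemma pvA_inner_step (tl res : List Char) (i : Nat) (acc : List String)
    (hi : 1 ≤ i) (hlt : i - 1 < tl.length) :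
    pvA_inner tl res (i - 1) i acc =
      (acc ++ [String.mk (res ++ [tl[i - 1]]).reverse], res ++ [tl[i - 1]], i) := by
  rw [pvA_inner]
  have h1 : i - 1 < i := by omega
  simp only [if_pos h1, tl.getElem?_eq_getElem hlt]
  rw [pvA_inner]
  have h2 : i - 1 + 1 = i := by omega
  simp [h2]

-- the outer loop from iteration i ≥ 1 (stroka already the stripped list, k = i - 1)
-- appends exactly the remaining adjacent bigrams
lemma pvA_outer_eq (tl : List Char) :
    ∀ fuel i acc, i + fuel = tl.length → 1 ≤ i →
      pvA_outer tl fuel i (i - 1) tl acc =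
        acc ++ (((tl.zip (tl.drop 1)).drop (i - 1)).map (fun p => String.mk [p.1, p.2])) := by
  intro fuel
  induction fuel with
  | zero =>
    intro i acc hlen hi
    have hz : (tl.zip (tl.drop 1)).length = tl.length - 1 := by
      simp [List.length_zip]
    rw [pvA_outer, List.drop_eq_nil_of_le (by omega)]
    simp
  | succ fuel' ih =>
    intro i acc hlen hi
    have hi_lt : i < tl.length := by omega
    have him : i - 1 < tl.length := by omega
    rw [pvA_outer]
    simp only [tl.getElem?_eq_getElem hi_lt]
    rw [pvA_inner_step tl [tl[i]] i acc hi him]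
    have h2 : i + 1 - 1 = i := by omega
    have := ih (i + 1) (acc ++ [String.mk ([tl[i]] ++ [tl[i - 1]]).reverse]) (by omega) (by omega)
    rw [h2] at this
    rw [this]
    have hzlt : i - 1 < (tl.zip (tl.drop 1)).length := by
      simp [List.length_zip]; omega
    rw [List.drop_eq_getElem_cons hzlt]
    have hi1 : i - 1 + 1 = i := by omega
    simp [List.getElem_zip, hi1]

lemma lstrip_of_head (a : Char) (l : List Char) (ha : PySem.Chars.isspace a = false) :
    PySem.Chars.lstrip (a :: l) = a :: l := by
  simp [PySem.Chars.lstrip, ha]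

-- ===== VERDICT (by name: the statement is the Claim_ definition above) =====
theorem all_variants_v2_spec : Claim_equal_all_variants_v2 := by
  intro text _ hpre
  unfold Spec_all_variants_v2 all_variants_v2 all_variants_v2_alt
  rw [PySem.Str.toList_lstrip]
  rcases h : text.toList with _ | ⟨a, _ | ⟨b, rest⟩⟩
  · simp [pvA_outer]
  · simp [pvA_outer, pvA_inner, PySem.Chars.lstrip]
  · have h2 : 2 ≤ text.toList.length := by rw [h, List.length_cons, List.length_cons]; omega
    have ha : PySem.Chars.isspace a = false := by
      have := hpre h2; rw [h] at this; simpa using this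
    rw [lstrip_of_head a (b :: rest) ha]
    simp only [List.length_cons]
    rw [pvA_outer]
    simp only [List.getElem?_cons_zero]
    rw [pvA_inner]
    simp only [Nat.lt_irrefl, if_false]
    have := pvA_outer_eq (a :: b :: rest) (rest.length + 1) 1 [] (by simp; omega) (by omega)
    simpa using this
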